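-- pv_equiv track=rewrite | github.com/tedhabeck/mcp-context-forge | scripts/license_checker.py | _canonicalize_pkg_name
-- ===== SOURCE A (Python) =====
-- def _canonicalize_pkg_name(value: str) -> str:
--     if not isinstance(value, str):
--         return ""
--     raw = value.strip()
--     if not raw:
--         return ""
--     for sep in (";", " ", "["):
--         if sep in raw:
--             raw = raw.split(sep, 1)[0].strip()
--     if "@" in raw:
--         raw = raw.split("@", 1)[0].strip()
--
--     for op in ("==", ">=", "<=", "!=", ">", "<", "~=", "==="):
--         if op in raw:
--             raw = raw.split(op, 1)[0].strip()
--     return raw.replace("_", "-").lower()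
-- ===== SOURCE B (Python) =====
-- def _canonicalize_pkg_name(value: str) -> str:
--     if not isinstance(value, str):
--         return ""
--     raw = value.strip()
--     if not raw:
--         return ""
--     # One pass over the delimiter/operator tokens in A's precedence order,
--     # maintaining only an integer cut position instead of re-slicing and
--     # re-stripping the string at every stage.
--     cut = len(raw)
--     for tok in (";", " ", "[", "@", "==", ">=", "<=", "!=", ">", "<", "~=", "==="):
--         pos = raw.find(tok, 0, cut)
--         if pos != -1:
--             cut = pos
--     return raw[:cut].strip().replace("_", "-").lower()
-- ===== Notes on version B (the rewrite author's own statement) =====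
-- stated objective: alternative
-- what changed: Instead of repeatedly re-slicing and re-stripping the string at every delimiter/operator stage, B scans the tokens once maintaining only an integer cut position via bounded str.find(tok, 0, cut), and slices and strips the string a single time at the end.
import Mathlib
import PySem

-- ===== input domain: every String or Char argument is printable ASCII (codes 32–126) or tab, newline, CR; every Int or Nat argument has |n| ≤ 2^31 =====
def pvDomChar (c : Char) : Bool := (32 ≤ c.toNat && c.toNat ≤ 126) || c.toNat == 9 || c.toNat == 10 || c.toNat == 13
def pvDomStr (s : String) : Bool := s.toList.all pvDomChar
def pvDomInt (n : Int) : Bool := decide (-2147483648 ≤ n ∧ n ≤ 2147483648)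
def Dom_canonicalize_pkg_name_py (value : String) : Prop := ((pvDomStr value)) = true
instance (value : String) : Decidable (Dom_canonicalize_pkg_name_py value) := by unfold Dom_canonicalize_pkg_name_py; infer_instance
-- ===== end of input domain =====

-- B replaces A's per-token re-slice-and-restrip of the string by a single integer
-- cut position maintained with bounded find, slicing and stripping once at the end.


-- ===== PORT A =====
-- One stage of A's loop body: `if sep in raw: raw = raw.split(sep, 1)[0].strip()`.
-- Every sep A uses is a nonempty literal, so `raw.split(sep, 1)` is `some` of a
-- nonempty list and Python's `[0]` is its head; `getD []`/`headD ""` only unpack that.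
def pvCutA (r sep : String) : String :=
  if PySem.Str.isIn sep r then
    PySem.Str.strip (((PySem.Str.splitMax? r sep 1).getD []).headD "")
  else r

def canonicalize_pkg_name_py (value : String) : String :=
  let raw0 := PySem.Str.strip value
  if raw0 = "" then ""
  else
    let raw1 := [";", " ", "["].foldl pvCutA raw0
    let raw2 := pvCutA raw1 "@"
    let raw3 := ["==", ">=", "<=", "!=", ">", "<", "~=", "==="].foldl pvCutA raw2
    PySem.Str.lower (PySem.Str.replace raw3 "_" "-")

-- ===== PORT B =====
def canonicalize_pkg_name_py_alt (value : String) : String :=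
  let raw := PySem.Str.strip value
  if raw = "" then ""
  else
    let cut := [";", " ", "[", "@", "==", ">=", "<=", "!=", ">", "<", "~=", "==="].foldl
      (fun cut tok =>
        -- raw.find(tok, 0, cut)
        let pos := PySem.Str.findFrom raw tok 0 (some cut)
        if pos ≠ -1 then pos else cut)
      (PySem.Str.len raw)
    PySem.Str.lower (PySem.Str.replace (PySem.Str.strip (PySem.Str.slice raw none (some cut))) "_" "-")

-- ===== PRECONDITION & SPEC =====
def Spec_canonicalize_pkg_name_py (value : String) (out : String) : Prop := out = canonicalize_pkg_name_py_alt value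
instance (value : String) (out : String) : Decidable (Spec_canonicalize_pkg_name_py value out) := by unfold Spec_canonicalize_pkg_name_py; infer_instance

-- ===== CLAIM (what is proved, stated in full; the proofs are below) =====
def Claim_equal_canonicalize_pkg_name_py : Prop := ∀ (value : String), Dom_canonicalize_pkg_name_py value → Spec_canonicalize_pkg_name_py value (canonicalize_pkg_name_py value)

-- ===== LEMMAS AND PROOFS =====

-- index of the first full occurrence of `sep` in a list (its length if absent)
def occIdx (sep : List Char) : List Char → Nat
  | [] => 0
  | c :: t => if sep.isPrefixOf (c :: t) then 0 else occIdx sep (t) + 1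

-- the tokens A/B cut at: nonempty, and either the single space or whitespace-free
def TokOK (t : List Char) : Prop := t ≠ [] ∧ (t = [' '] ∨ ∀ c ∈ t, PySem.Chars.isspace c = false)

lemma occIdx_le (sep l : List Char) : occIdx sep l ≤ l.length := by
  induction l with
  | nil => simp [occIdx]
  | cons c t ih => simp only [occIdx]; split <;> simp <;> omega

lemma occIdx_eq_length (sep l : List Char) (h : ¬ sep <:+: l) : occIdx sep l = l.length := by
  induction l with
  | nil => simp [occIdx]
  | cons c t ih =>
    simp only [occIdx]
    rw [List.infix_cons_iff] at h
    push_neg at h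
    rw [if_neg (by rw [List.isPrefixOf_iff_prefix]; exact fun hc => h.1 hc)]
    simp [ih h.2]

lemma prefix_drop_occIdx (sep l : List Char) (h : sep <:+: l) : sep <+: l.drop (occIdx sep l) := by
  induction l with
  | nil => simp_all [List.infix_nil]
  | cons c t ih =>
    simp only [occIdx]
    by_cases hp : sep.isPrefixOf (c :: t)
    · simp only [if_pos hp, List.drop_zero]
      exact List.isPrefixOf_iff_prefix.mp hp
    · rw [if_neg hp]
      rw [List.infix_cons_iff] at h
      rcases h with h | h
      · exact absurd (List.isPrefixOf_iff_prefix.mpr h) hp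
      · simpa using ih h

lemma occIdx_le_of_prefix_drop (sep l : List Char) (i : ℕ) (h : sep <+: l.drop i) :
    occIdx sep l ≤ i := by
  induction l generalizing i with
  | nil => simp [occIdx]
  | cons c t ih =>
    simp only [occIdx]
    by_cases hp : sep.isPrefixOf (c :: t)
    · simp [hp]
    · rw [if_neg hp]
      cases i with
      | zero => exact absurd (List.isPrefixOf_iff_prefix.mpr (by simpa using h)) hp
      | succ j =>
        have := ih j (by simpa using h)
        omega

lemma occIdx_add_length_le (sep l : List Char) (h : sep <:+: l) :
    occIdx sep l + sep.length ≤ l.length := by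
  have h1 := prefix_drop_occIdx sep l h
  have h2 := h1.length_le
  have h3 := occIdx_le sep l
  rw [List.length_drop] at h2
  omega

lemma find_go_occ (sub : List Char) (hsub : sub ≠ []) :
    ∀ (l : List Char) (k : ℕ),
      PySem.Chars.find.go sub l k = if sub <:+: l then ((k : ℤ) + occIdx sub l) else -1 := by
  intro l
  induction l with
  | nil =>
    intro k
    rw [PySem.Chars.find.go.eq_def]
    simp [List.infix_nil, hsub, List.isEmpty_iff]
  | cons c t ih =>
    intro k
    rw [PySem.Chars.find.go.eq_def]
    simp only []
    by_cases hp : sub.isPrefixOf (c :: t)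
    · rw [if_pos hp]
      have : sub <:+: c :: t := (List.isPrefixOf_iff_prefix.mp hp).isInfix
      simp [this, occIdx, hp]
    · rw [if_neg hp, ih (k + 1)]
      by_cases hin : sub <:+: t
      · have : sub <:+: c :: t := by rw [List.infix_cons_iff]; exact Or.inr hin
        rw [if_pos hin, if_pos this]
        simp only [occIdx, if_neg hp]
        push_cast
        ring
      · have : ¬ sub <:+: c :: t := by
          rw [List.infix_cons_iff]
          push_neg
          exact ⟨fun hc => hp (List.isPrefixOf_iff_prefix.mpr hc), hin⟩
        rw [if_neg hin, if_neg this]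

lemma find_eq_occ (l sub : List Char) (hsub : sub ≠ []) :
    PySem.Chars.find l sub = if sub <:+: l then (occIdx sub l : ℤ) else -1 := by
  simpa using find_go_occ sub hsub l 0

-- ---- strip machinery ----

lemma rstrip_prefix (x : List Char) : PySem.Chars.rstrip x <+: x := by
  have h := List.dropWhile_suffix (l := x.reverse) PySem.Chars.isspace
  have h2 := List.reverse_prefix.mpr h
  simpa [PySem.Chars.rstrip] using h2

lemma rstrip_decomp (x : List Char) :
    x = PySem.Chars.rstrip x ++ (x.reverse.takeWhile PySem.Chars.isspace).reverse ∧
      ∀ c ∈ (x.reverse.takeWhile PySem.Chars.isspace).reverse, PySem.Chars.isspace c = true := by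
  constructor
  · conv_lhs => rw [← x.reverse_reverse,
      ← List.takeWhile_append_dropWhile (p := PySem.Chars.isspace) (l := x.reverse)]
    rw [List.reverse_append]
    rfl
  · intro c hc
    exact List.mem_takeWhile_imp (List.mem_reverse.mp hc)

lemma dropWhile_idem {α : Type} (p : α → Bool) (l : List α) :
    List.dropWhile p (List.dropWhile p l) = List.dropWhile p l := by
  induction l with
  | nil => simp
  | cons c t ih =>
    by_cases h : p c
    · simp [List.dropWhile_cons, h, ih]
    · simp [List.dropWhile_cons, h]

lemma rstrip_idem (x : List Char) : PySem.Chars.rstrip (PySem.Chars.rstrip x) = PySem.Chars.rstrip x := by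
  simp [PySem.Chars.rstrip, dropWhile_idem]

lemma lstrip_take (x : List Char) (m : ℕ) (h : PySem.Chars.lstrip x = x) :
    PySem.Chars.lstrip (x.take m) = x.take m := by
  simp only [PySem.Chars.lstrip] at *
  rw [List.dropWhile_eq_self_iff] at *
  intro hl
  have h0 : 0 < x.length := by
    rw [List.length_take] at hl
    omega
  have : (x.take m)[0] = x[0] := List.getElem_take
  rw [this]
  exact h h0

lemma strip_eq_rstrip (x : List Char) (h : PySem.Chars.lstrip x = x) :
    PySem.Chars.strip x = PySem.Chars.rstrip x := by
  simp [PySem.Chars.strip, h]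

lemma lstrip_of_strip_eq (x : List Char) (h : PySem.Chars.strip x = x) :
    PySem.Chars.lstrip x = x := by
  have h1 : PySem.Chars.lstrip x <:+ x := List.dropWhile_suffix _
  have h2 : PySem.Chars.rstrip (PySem.Chars.lstrip x) <+: PySem.Chars.lstrip x := rstrip_prefix _
  have h3 : PySem.Chars.rstrip (PySem.Chars.lstrip x) = x := h
  apply h1.eq_of_length
  have h4 := h2.length_le
  have h5 := h1.length_le
  rw [h3] at h4
  omega

lemma lstrip_of_prefix (x y : List Char) (h : y <+: x) (hx : PySem.Chars.lstrip x = x) :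
    PySem.Chars.lstrip y = y := by
  rw [List.prefix_iff_eq_take.mp h]
  exact lstrip_take x _ hx

lemma strip_idem (x : List Char) :
    PySem.Chars.strip (PySem.Chars.strip x) = PySem.Chars.strip x := by
  have h1 : PySem.Chars.strip x = PySem.Chars.rstrip (PySem.Chars.lstrip x) := rfl
  have hll : PySem.Chars.lstrip (PySem.Chars.lstrip x) = PySem.Chars.lstrip x :=
    dropWhile_idem _ _
  have h2 : PySem.Chars.lstrip (PySem.Chars.strip x) = PySem.Chars.strip x := by
    rw [h1]
    exact lstrip_of_prefix _ _ (rstrip_prefix _) hll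
  rw [strip_eq_rstrip _ h2, h1, rstrip_idem]

lemma rstrip_append_ws (y w : List Char) (hw : ∀ c ∈ w, PySem.Chars.isspace c = true) :
    PySem.Chars.rstrip (y ++ w) = PySem.Chars.rstrip y := by
  simp only [PySem.Chars.rstrip, List.reverse_append]
  rw [List.dropWhile_append]
  have : List.dropWhile PySem.Chars.isspace w.reverse = [] :=
    List.dropWhile_eq_nil_iff.mpr (fun c hc => hw c (List.mem_reverse.mp hc))
  simp [this]

-- ---- the key step lemma: one A-stage on strip(x) is strip of one cut of x ----

lemma step_key (x t : List Char) (hx : PySem.Chars.lstrip x = x) (ht : TokOK t) :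
    PySem.Chars.strip ((PySem.Chars.strip x).take (occIdx t (PySem.Chars.strip x)))
      = PySem.Chars.strip (x.take (occIdx t x)) := by
  obtain ⟨hne, hcase⟩ := ht
  have htl : 0 < t.length := List.length_pos_iff.mpr hne
  have hsx : PySem.Chars.strip x = PySem.Chars.rstrip x := strip_eq_rstrip x hx
  obtain ⟨hxw, hw⟩ := rstrip_decomp x
  set w := (x.reverse.takeWhile PySem.Chars.isspace).reverse with hwdef
  set y := PySem.Chars.rstrip x with hydef
  have hyp : y <+: x := rstrip_prefix x
  have hytake : y = x.take y.length := List.prefix_iff_eq_take.mp hyp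
  have hly : PySem.Chars.lstrip y = y := lstrip_of_prefix x y hyp hx
  have hry : PySem.Chars.rstrip y = y := rstrip_idem x
  have hsy : PySem.Chars.strip y = y := by rw [strip_eq_rstrip y hly, hry]
  set k := y.length with hkdef
  set j := occIdx t x with hjdef
  have hklen : k + w.length = x.length := by
    have := congrArg List.length hxw
    simp at this
    omega
  rw [hsx]
  -- lifting an occurrence in y to an occurrence in x at the same index
  have lift : ∀ i : ℕ, t <+: y.drop i → t <+: x.drop i := by
    intro i hi
    rw [hytake, List.drop_take] at hi
    exact (List.prefix_take_iff.mp hi).1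
  by_cases hin : t <:+: x
  · have hocc : t <+: x.drop j := prefix_drop_occIdx t x hin
    have hjlen : j + t.length ≤ x.length := occIdx_add_length_le t x hin
    by_cases hjk : j + t.length ≤ k
    · -- the first occurrence survives into y at the same index
      have h1 : t <+: y.drop j := by
        rw [hytake, List.drop_take]
        exact List.prefix_take_iff.mpr ⟨hocc, by omega⟩
      have hjy : occIdx t y = j := by
        apply le_antisymm (occIdx_le_of_prefix_drop t y j h1)
        have hiny : t <:+: y := (h1.isInfix).trans (List.drop_suffix j y).isInfix
        exact occIdx_le_of_prefix_drop t x _ (lift _ (prefix_drop_occIdx t y hiny))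
      rw [hjy, hytake, List.take_take, min_eq_left (by omega : j ≤ k)]
    · -- the occurrence straddles or lies in the trailing-whitespace region
      rcases hcase with hsp | hnw
      · -- t is the single space
        subst hsp
        have hjge : k ≤ j := by simp only [List.length_singleton] at hjk; omega
        have hnin : ¬ ([' '] : List Char) <:+: y := by
          intro hcon
          have h2 := occIdx_le_of_prefix_drop [' '] x _ (lift _ (prefix_drop_occIdx [' '] y hcon))
          have h3 := occIdx_add_length_le [' '] y hcon
          simp at h3
          omega
        have hjy : occIdx [' '] y = k := occIdx_eq_length [' '] y hnin
        have hxj : x.take j = y ++ w.take (j - k) := by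
          rw [hxw, List.take_append, List.take_of_length_le (by omega : y.length ≤ j)]
        have hw' : ∀ c ∈ w.take (j - k), PySem.Chars.isspace c = true :=
          fun c hc => hw c (List.take_subset _ _ hc)
        have hl' : PySem.Chars.lstrip (x.take j) = x.take j := lstrip_take x j hx
        rw [hjy, List.take_length, hsy, strip_eq_rstrip _ hl', hxj,
          rstrip_append_ws y _ hw', hry]
      · -- t whitespace-free: impossible
        exfalso
        by_cases hjk2 : k ≤ j
        · -- the whole occurrence lies in the whitespace tail
          have hdx : x.drop j = w.drop (j - k) := by
            rw [hxw, List.drop_append, List.drop_eq_nil_of_le (by omega : y.length ≤ j)]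
            simp [hkdef]
          have hc : t.head hne ∈ t := List.head_mem hne
          have : t.head hne ∈ w := by
            have := hocc.subset hc
            rw [hdx] at this
            exact List.drop_subset _ _ this
          have := hw _ this
          rw [hnw _ hc] at this
          exact Bool.false_ne_true this
        · -- the occurrence straddles index k: its char at k - j is whitespace
          have hjk3 : j < k := by omega
          have hkj : k - j < t.length := by omega
          have he1 : t[k - j]'hkj = (x.drop j)[k - j]'(by rw [List.length_drop]; omega) :=
            hocc.getElem hkj
          have he2 : (x.drop j)[k - j]'(by rw [List.length_drop]; omega) = x[k]'(by omega) := by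
            rw [List.getElem_drop]
            congr 1
            omega
          have he3 : x[k]'(by omega) = w[0]'(by omega) := by
            have h4 : (x.drop k)[0]'(by rw [List.length_drop]; omega) = x[k]'(by omega) := by
              simp [List.getElem_drop]
            have hdx : x.drop k = w := by
              rw [hxw, List.drop_append, List.drop_eq_nil_of_le (le_refl y.length)]
              simp [hkdef]
            rw [← h4]
            congr 1
          have hwsp := hw _ (List.getElem_mem (l := w) (n := 0) (by omega))
          have hnot := hnw _ (List.getElem_mem (l := t) (n := k - j) hkj)
          rw [he1, he2, he3, hwsp] at hnot
          exact Bool.noConfusion hnot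
  · -- t occurs nowhere in x
    have hj : j = x.length := occIdx_eq_length t x hin
    have hnin : ¬ t <:+: y := fun hcon => hin (hcon.trans hyp.isInfix)
    have hjy : occIdx t y = k := occIdx_eq_length t y hnin
    rw [hjy, hj, List.take_length, List.take_length, hsy, ← hsx]

-- ---- head of split(sep, 1) ----

lemma splitGo_acc (sep : List Char) :
    ∀ (fuel : ℕ) (m : ℕ) (l cur : List Char) (acc : List (List Char)) (p : List Char),
      ∃ rest, PySem.Chars.splitOnMax.go sep fuel m l cur (acc ++ [p]) = p :: rest := by
  intro fuel
  induction fuel with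
  | zero =>
    intro m l cur acc p
    rw [PySem.Chars.splitOnMax.go.eq_def]
    exact ⟨acc.reverse ++ [cur.reverse ++ l], by simp⟩
  | succ f ih =>
    intro m l cur acc p
    rw [PySem.Chars.splitOnMax.go.eq_def]
    cases l with
    | nil => exact ⟨acc.reverse ++ [cur.reverse], by simp⟩
    | cons c rest =>
      dsimp only
      by_cases hm : m = 0
      · rw [if_pos hm]
        exact ⟨acc.reverse ++ [cur.reverse ++ c :: rest], by simp⟩
      · rw [if_neg hm]
        by_cases hp : sep.isPrefixOf (c :: rest)
        · rw [if_pos hp]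
          have := ih (m - 1) (List.drop sep.length (c :: rest)) [] (cur.reverse :: acc) p
          simpa using this
        · rw [if_neg hp]
          exact ih m rest (c :: cur) acc p

lemma splitGo_head (sep : List Char) :
    ∀ (fuel : ℕ) (l cur : List Char), l.length + 1 ≤ fuel →
      ∃ rest, PySem.Chars.splitOnMax.go sep fuel 1 l cur []
        = (cur.reverse ++ l.take (occIdx sep l)) :: rest := by
  intro fuel
  induction fuel with
  | zero => intro l cur h; omega
  | succ f ih =>
    intro l cur h
    rw [PySem.Chars.splitOnMax.go.eq_def]
    cases l with
    | nil => exact ⟨[], by simp [occIdx]⟩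
    | cons c rest =>
      dsimp only
      rw [if_neg (by omega : ¬ (1 : ℕ) = 0)]
      by_cases hp : sep.isPrefixOf (c :: rest)
      · rw [if_pos hp]
        obtain ⟨r2, hr2⟩ := splitGo_acc sep f 0 (List.drop sep.length (c :: rest)) [] [] cur.reverse
        refine ⟨r2, ?_⟩
        simp only [List.nil_append] at hr2
        rw [hr2]
        simp [occIdx, hp]
      · rw [if_neg hp]
        obtain ⟨r2, hr2⟩ := ih rest (c :: cur) (by simp at h ⊢; omega)
        refine ⟨r2, ?_⟩
        rw [hr2]
        simp only [occIdx, if_neg hp, List.reverse_cons, List.take_succ_cons]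
        simp

lemma splitOnMax_head (l sep : List Char) :
    ∃ rest, PySem.Chars.splitOnMax l sep 1 = l.take (occIdx sep l) :: rest := by
  unfold PySem.Chars.splitOnMax
  rw [if_neg (by omega : ¬ (1 : ℤ) < 0)]
  obtain ⟨rest, hr⟩ := splitGo_head sep (l.length + 1) l [] (le_refl _)
  exact ⟨rest, by simpa using hr⟩

-- ---- A-side stage in canonical form ----

lemma pvCutA_toList (r sep : String) (hsep : sep.toList ≠ [])
    (hstr : PySem.Chars.strip r.toList = r.toList) :
    (pvCutA r sep).toList = PySem.Chars.strip (r.toList.take (occIdx sep.toList r.toList)) := by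
  unfold pvCutA
  by_cases hin : PySem.Str.isIn sep r
  · rw [if_pos hin]
    have hne : sep.toList.isEmpty = false := by
      rw [List.isEmpty_eq_false_iff]
      exact hsep
    obtain ⟨rest, hr⟩ := splitOnMax_head r.toList sep.toList
    rw [PySem.Str.toList_strip]
    congr 1
    simp only [PySem.Str.splitMax?, PySem.Chars.splitMax?, hne, Bool.false_eq_true, if_false,
      Option.map_some, Option.getD_some, hr, List.map_cons, List.headD_cons]
    rw [String.toList_ofList]
  · rw [if_neg hin]
    have : ¬ sep.toList <:+: r.toList := by
      rw [PySem.Str.isIn_eq] at hin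
      rw [← PySem.Chars.isIn_iff_infix]
      simpa using hin
    rw [occIdx_eq_length _ _ this, List.take_length, hstr]

def stepTok (raw : List Char) (c : ℕ) (t : String) : ℕ := occIdx t.toList (raw.take c)

lemma stepTok_le (raw : List Char) (c : ℕ) (t : String) (h : c ≤ raw.length) :
    stepTok raw c t ≤ raw.length := by
  unfold stepTok
  have h1 := occIdx_le t.toList (raw.take c)
  rw [List.length_take] at h1
  omega

lemma foldA_eq (raw : String) (hraw : PySem.Chars.strip raw.toList = raw.toList) :
    ∀ (ts : List String), (∀ t ∈ ts, TokOK t.toList) →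
      ∀ (cut : ℕ), cut ≤ raw.toList.length →
      ∀ (r : String), r.toList = PySem.Chars.strip (raw.toList.take cut) →
        (ts.foldl pvCutA r).toList
          = PySem.Chars.strip (raw.toList.take (ts.foldl (stepTok raw.toList) cut)) := by
  intro ts
  induction ts with
  | nil => intro _ cut _ r hr; simpa using hr
  | cons t ts ih =>
    intro hts cut hcut r hr
    have htok := hts t (List.mem_cons_self)
    have hstr_r : PySem.Chars.strip r.toList = r.toList := by
      rw [hr]; exact strip_idem _
    have hx : PySem.Chars.lstrip (raw.toList.take cut) = raw.toList.take cut :=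
      lstrip_take _ _ (lstrip_of_strip_eq _ hraw)
    have hj : occIdx t.toList (raw.toList.take cut) ≤ cut := by
      have := occIdx_le t.toList (raw.toList.take cut)
      rw [List.length_take] at this
      omega
    have h1 : (pvCutA r t).toList
        = PySem.Chars.strip (raw.toList.take (stepTok raw.toList cut t)) := by
      rw [pvCutA_toList r t htok.1 hstr_r, hr, step_key _ _ hx htok]
      unfold stepTok
      rw [List.take_take, min_eq_left hj]
    rw [List.foldl_cons, List.foldl_cons]
    exact ih (fun u hu => hts u (List.mem_cons_of_mem _ hu)) _
      (stepTok_le _ _ _ hcut) _ h1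

-- ---- B-side stage in canonical form ----

lemma stepB_eq (raw tok : String) (htok : tok.toList ≠ []) (n : ℕ)
    (hn : n ≤ raw.toList.length) :
    (if PySem.Str.findFrom raw tok 0 (some (n : ℤ)) ≠ -1
        then PySem.Str.findFrom raw tok 0 (some (n : ℤ)) else (n : ℤ))
      = (occIdx tok.toList (raw.toList.take n) : ℤ) := by
  have hfind : PySem.Str.findFrom raw tok 0 (some (n : ℤ))
      = if tok.toList <:+: raw.toList.take n
          then (occIdx tok.toList (raw.toList.take n) : ℤ) else -1 := by
    rw [PySem.Str.findFrom_eq]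
    simp only [PySem.Chars.findFrom]
    rw [if_neg (by omega : ¬ (raw.toList.length : ℤ) < (n : ℤ))]
    rw [if_neg (by omega : ¬ (n : ℤ) < 0)]
    rw [if_neg (by omega : ¬ (0 : ℤ) < 0)]
    rw [if_neg (by omega : ¬ (n : ℤ) < 0)]
    simp only [Int.toNat_zero, List.drop_zero, Int.toNat_natCast]
    rw [find_eq_occ _ _ htok]
    by_cases hin : tok.toList <:+: raw.toList.take n
    · simp only [if_pos hin]
      have h0 : (0 : ℤ) ≤ (occIdx tok.toList (raw.toList.take n) : ℤ) := Int.natCast_nonneg _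
      rw [if_neg (by omega)]
      simp
    · simp [hin]
  rw [hfind]
  by_cases hin : tok.toList <:+: raw.toList.take n
  · simp only [if_pos hin]
    have h0 : (0 : ℤ) ≤ (occIdx tok.toList (raw.toList.take n) : ℤ) := Int.natCast_nonneg _
    rw [if_pos (by omega)]
  · simp only [if_neg hin]
    rw [if_neg (by simp)]
    rw [occIdx_eq_length _ _ hin, List.length_take]
    omega

lemma foldB_eq (raw : String) :
    ∀ (ts : List String), (∀ t ∈ ts, t.toList ≠ []) →
      ∀ (n : ℕ), n ≤ raw.toList.length →
        ts.foldl (fun cut tok =>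
            if PySem.Str.findFrom raw tok 0 (some cut) ≠ -1
              then PySem.Str.findFrom raw tok 0 (some cut) else cut) (n : ℤ)
          = ((ts.foldl (stepTok raw.toList) n : ℕ) : ℤ) := by
  intro ts
  induction ts with
  | nil => intro _ n _; rfl
  | cons t ts ih =>
    intro hts n hn
    have hs := stepB_eq raw t (hts t List.mem_cons_self) n hn
    rw [List.foldl_cons, List.foldl_cons, hs]
    exact ih (fun u hu => hts u (List.mem_cons_of_mem _ hu)) _
      (stepTok_le _ _ _ hn)

lemma slice_take (l : List Char) (n : ℕ) (h : n ≤ l.length) :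
    PySem.List.slice l none (some (n : ℤ)) = l.take n := by
  simp only [PySem.List.slice, PySem.List.clampIdx]
  rw [if_neg (by omega : ¬ (n : ℤ) < 0)]
  simp [min_eq_left h]

lemma foldTok_le (raw : List Char) :
    ∀ (ts : List String) (n : ℕ), n ≤ raw.length → ts.foldl (stepTok raw) n ≤ raw.length := by
  intro ts
  induction ts with
  | nil => intro n h; simpa using h
  | cons t ts ih => intro n h; rw [List.foldl_cons]; exact ih _ (stepTok_le _ _ _ h)

-- ===== VERDICT (by name: the statement is the Claim_ definition above) =====
theorem canonicalize_pkg_name_py_spec : Claim_equal_canonicalize_pkg_name_py := by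
  intro value _
  unfold Spec_canonicalize_pkg_name_py
  simp only [canonicalize_pkg_name_py, canonicalize_pkg_name_py_alt]
  by_cases h0 : PySem.Str.strip value = ""
  · rw [if_pos h0, if_pos h0]
  · rw [if_neg h0, if_neg h0]
    refine congrArg PySem.Str.lower (congrArg (fun s => PySem.Str.replace s "_" "-") ?_)
    have hstr : PySem.Chars.strip (PySem.Str.strip value).toList
        = (PySem.Str.strip value).toList := by
      rw [PySem.Str.toList_strip]; exact strip_idem _
    have htoks : ∀ t ∈ ([";", " ", "[", "@", "==", ">=", "<=", "!=", ">", "<", "~=", "==="] :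
        List String), TokOK t.toList := by
      intro t ht
      fin_cases ht <;> refine ⟨by decide, ?_⟩
      case «1» => exact Or.inl (by decide)
      all_goals exact Or.inr (by intro c hc; fin_cases hc <;> rfl)
    have hA := foldA_eq (PySem.Str.strip value) hstr
      [";", " ", "[", "@", "==", ">=", "<=", "!=", ">", "<", "~=", "==="] htoks
      (PySem.Str.strip value).toList.length le_rfl (PySem.Str.strip value)
      (by rw [List.take_length]; exact hstr.symm)
    have hB := foldB_eq (PySem.Str.strip value)
      [";", " ", "[", "@", "==", ">=", "<=", "!=", ">", "<", "~=", "==="]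
      (fun t ht => (htoks t ht).1) (PySem.Str.strip value).toList.length le_rfl
    have hnest : List.foldl pvCutA
        (pvCutA (List.foldl pvCutA (PySem.Str.strip value) [";", " ", "["]) "@")
        ["==", ">=", "<=", "!=", ">", "<", "~=", "==="]
      = List.foldl pvCutA (PySem.Str.strip value)
          [";", " ", "[", "@", "==", ">=", "<=", "!=", ">", "<", "~=", "==="] := by
      simp only [List.foldl_cons, List.foldl_nil]
    have hlen : PySem.Str.len (PySem.Str.strip value)
        = (((PySem.Str.strip value).toList.length : ℕ) : ℤ) := rfl
    rw [← String.toList_inj, hnest, hA, hlen, hB]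
    simp only [PySem.Str.toList_strip, PySem.Str.toList_slice, PySem.Chars.slice_eq_listSlice]
    rw [slice_take _ _ (foldTok_le _ _ _ le_rfl)]
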